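-- pv_equiv track=rewrite | github.com/snarayan21/task-graphs | src/autonomous_construction/initial_blocks.py | block_widths_to_ranges
-- ===== SOURCE A (Python) =====
-- def block_widths_to_ranges(block_widths):
--     block_ranges = []
--     for layer_blocks in block_widths:
--         currpos = 0
--         layer_ranges = []
--         for width in layer_blocks:
--             layer_ranges.append([currpos, currpos + width, width])
--             currpos += width
--         block_ranges.append(layer_ranges)
--     return block_ranges
-- ===== SOURCE B (Python) =====
-- from itertools import accumulate
--
--
-- def block_widths_to_ranges(block_widths):
--     block_ranges = []
--     for layer_blocks in block_widths:
--         offsets = list(accumulate(layer_blocks, initial=0))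
--         block_ranges.append([[s, e, w] for s, e, w in
--                              zip(offsets, offsets[1:], layer_blocks)])
--     return block_ranges
-- ===== Notes on version B (the rewrite author's own statement) =====
-- stated objective: alternative
-- what changed: Replaces the running-position accumulator loop with an explicit prefix-sum table (itertools.accumulate with initial=0) and a second pass zipping consecutive offsets with the widths.
import Mathlib
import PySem

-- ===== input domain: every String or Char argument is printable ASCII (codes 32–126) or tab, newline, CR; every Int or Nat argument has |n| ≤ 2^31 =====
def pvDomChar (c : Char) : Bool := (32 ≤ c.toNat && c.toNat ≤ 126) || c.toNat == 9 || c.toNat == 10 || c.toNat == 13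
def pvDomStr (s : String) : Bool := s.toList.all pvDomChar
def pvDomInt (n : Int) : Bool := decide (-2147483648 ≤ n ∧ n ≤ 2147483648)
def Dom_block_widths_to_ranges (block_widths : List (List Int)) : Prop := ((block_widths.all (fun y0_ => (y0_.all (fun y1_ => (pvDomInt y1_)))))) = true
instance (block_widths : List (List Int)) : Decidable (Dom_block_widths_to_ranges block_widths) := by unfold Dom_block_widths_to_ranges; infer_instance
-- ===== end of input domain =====

-- B replaces the running-position accumulator with a prefix-sum table zipped against the widths; same cost, different decomposition.


-- ===== PORT A =====
-- inner loop of A: state (currpos, layer_ranges), append at the end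
def block_widths_to_ranges (block_widths : List (List Int)) : List (List (List Int)) :=
  block_widths.foldl (fun block_ranges layer_blocks =>
    let st := layer_blocks.foldl
      (fun (st : Int × List (List Int)) width =>
        (st.1 + width, st.2 ++ [[st.1, st.1 + width, width]]))
      (0, [])
    block_ranges ++ [st.2]) []

-- ===== PORT B =====
-- offsets = list(accumulate(layer, initial=0)); zip(offsets, offsets[1:], layer)
def block_widths_to_ranges_alt (block_widths : List (List Int)) : List (List (List Int)) :=
  block_widths.map (fun layer_blocks =>
    let offsets := List.scanl (· + ·) 0 layer_blocks
    List.zipWith3 (fun s e w => [s, e, w]) offsets (offsets.drop 1) layer_blocks)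

-- ===== PRECONDITION & SPEC =====
def Spec_block_widths_to_ranges (block_widths : List (List Int)) (out : List (List (List Int))) : Prop := out = block_widths_to_ranges_alt block_widths
instance (block_widths : List (List Int)) (out : List (List (List Int))) : Decidable (Spec_block_widths_to_ranges block_widths out) := by unfold Spec_block_widths_to_ranges; infer_instance

-- ===== CLAIM (what is proved, stated in full; the proofs are below) =====
def Claim_equal_block_widths_to_ranges : Prop := ∀ (block_widths : List (List Int)), Dom_block_widths_to_ranges block_widths → Spec_block_widths_to_ranges block_widths (block_widths_to_ranges block_widths)

-- ===== LEMMAS AND PROOFS =====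

-- A's inner accumulator loop equals B's zip of consecutive prefix sums, generalized over start position and accumulator.
theorem pv_layer_eq (ws : List Int) : ∀ (pos : Int) (acc : List (List Int)),
    (ws.foldl (fun (st : Int × List (List Int)) width =>
        (st.1 + width, st.2 ++ [[st.1, st.1 + width, width]])) (pos, acc)).2
      = acc ++ List.zipWith3 (fun s e w => [s, e, w])
          (List.scanl (· + ·) pos ws) ((List.scanl (· + ·) pos ws).drop 1) ws := by
  induction ws with
  | nil => simp
  | cons w ws ih =>
      intro pos acc
      simp only [List.foldl_cons]
      rw [ih (pos + w) (acc ++ [[pos, pos + w, w]])]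
      rw [List.scanl_cons]
      cases ws with
      | nil => simp [List.zipWith3, List.scanl]
      | cons w2 ws2 =>
          rw [List.scanl_cons]
          simp [List.zipWith3]

-- A's outer loop is a map with an append-accumulator.
theorem pv_outer_eq (ls : List (List Int)) : ∀ (acc : List (List (List Int))),
    ls.foldl (fun block_ranges layer_blocks =>
        block_ranges ++ [(layer_blocks.foldl
          (fun (st : Int × List (List Int)) width =>
            (st.1 + width, st.2 ++ [[st.1, st.1 + width, width]])) (0, [])).2]) acc
      = acc ++ ls.map (fun layer_blocks => (layer_blocks.foldl
          (fun (st : Int × List (List Int)) width =>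
            (st.1 + width, st.2 ++ [[st.1, st.1 + width, width]])) (0, [])).2) := by
  induction ls with
  | nil => simp
  | cons l ls ih =>
      intro acc
      simp only [List.foldl_cons, List.map_cons]
      rw [ih]
      simp

-- ===== VERDICT (by name: the statement is the Claim_ definition above) =====
theorem block_widths_to_ranges_spec : Claim_equal_block_widths_to_ranges := by
  intro bw _
  unfold Spec_block_widths_to_ranges block_widths_to_ranges block_widths_to_ranges_alt
  rw [pv_outer_eq bw []]
  simp only [List.nil_append]
  exact List.map_congr_left (fun l _ => pv_layer_eq l 0 [])
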